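-- pv_equiv track=rewrite | github.com/mogongzi/ask-code | tools/components/rails_naming.py | table_to_model
-- ===== SOURCE A (Python) =====
-- def table_to_model(table: str) -> str:
--     """Convert a SQL table name to a Rails model name (CamelCase singular).
--
--     Handles common pluralization patterns conservatively and strips any schema
--     prefix (e.g., "public.users" → "User").
--     """
--     if not table:
--         return ""
--
--     # Remove any schema prefix and normalize
--     base = table.split(".")[-1].lower()
--
--     # Conservative plural → singular handling
--     if base.endswith("ies"):
--         singular = base[:-3] + "y"
--     elif (
--         base.endswith("sses")
--         or base.endswith("xes")
--         or base.endswith("zes")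
--         or base.endswith("ches")
--         or base.endswith("shes")
--     ):
--         singular = base[:-2]
--     elif base.endswith("s"):
--         singular = base[:-1]
--     else:
--         singular = base
--
--     # Convert to CamelCase
--     return "".join(part.capitalize() for part in singular.split("_"))
-- ===== SOURCE B (Python) =====
-- # Rule-table singularization + one-pass CamelCase scan (instead of if/elif ladder + split/capitalize/join).
-- _RULES = [("ies", 3, "y"), ("sses", 2, ""), ("xes", 2, ""), ("zes", 2, ""),
--           ("ches", 2, ""), ("shes", 2, ""), ("s", 1, "")]
--
--
-- def table_to_model(table: str) -> str:
--     if not table: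
--         return ""
--     base = table.split(".")[-1].lower()
--     singular = base
--     for suffix, strip, append in _RULES:
--         if base.endswith(suffix):
--             singular = base[:-strip] + append
--             break
--     out = []
--     cap = True
--     for ch in singular:
--         if ch == "_":
--             cap = True
--         elif cap:
--             out.append(ch.upper())
--             cap = False
--         else:
--             out.append(ch.lower())
--     return "".join(out)
-- ===== Notes on version B (the rewrite author's own statement) =====
-- stated objective: alternative
-- what changed: Replaces the if/elif singularization ladder with a first-match traversal of an ordered rule table (suffix, strip, append), and replaces split('_')/capitalize/join with a single character scan carrying a capitalize-next flag.
import Mathlib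
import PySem

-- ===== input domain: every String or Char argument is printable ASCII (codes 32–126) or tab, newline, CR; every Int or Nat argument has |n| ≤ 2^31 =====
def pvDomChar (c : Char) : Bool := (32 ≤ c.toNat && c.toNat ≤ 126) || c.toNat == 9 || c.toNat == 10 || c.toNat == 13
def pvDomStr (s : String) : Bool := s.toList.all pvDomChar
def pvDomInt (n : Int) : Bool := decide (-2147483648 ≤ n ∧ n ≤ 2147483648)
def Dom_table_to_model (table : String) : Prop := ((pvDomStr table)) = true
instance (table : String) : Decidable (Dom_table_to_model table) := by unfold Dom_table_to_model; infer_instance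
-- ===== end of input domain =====

-- B replaces A's if/elif singularization ladder by a first-match traversal of a rule table and the
-- split('_')/capitalize/join camelization by a single character scan with a capitalize-next flag (objective: alternative).

-- ===== PORT A =====
-- part.capitalize(): first char uppercased, the rest lowercased — exact on ASCII (PySem has no capitalize)
def pyCapitalize (s : List Char) : List Char :=
  match s with
  | [] => []
  | c :: t => PySem.Chars.upperChar c :: PySem.Chars.lower t

def table_to_model (table : String) : String :=
  if table.toList = [] then "" else
  let base := PySem.Chars.lower (PySem.List.pyGetD (PySem.Chars.splitOn table.toList ['.']) (-1) [])
  let singular :=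
    if PySem.Chars.endswith base "ies".toList then
      PySem.List.slice base none (some (-3)) ++ "y".toList
    else if PySem.Chars.endswith base "sses".toList || PySem.Chars.endswith base "xes".toList
        || PySem.Chars.endswith base "zes".toList || PySem.Chars.endswith base "ches".toList
        || PySem.Chars.endswith base "shes".toList then
      PySem.List.slice base none (some (-2))
    else if PySem.Chars.endswith base "s".toList then
      PySem.List.slice base none (some (-1))
    else base
  String.mk (PySem.Chars.join [] ((PySem.Chars.splitOn singular ['_']).map pyCapitalize))

-- ===== PORT B =====
def pvRules : List (List Char × Int × List Char) :=
  [("ies".toList, 3, "y".toList), ("sses".toList, 2, []), ("xes".toList, 2, []),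
   ("zes".toList, 2, []), ("ches".toList, 2, []), ("shes".toList, 2, []), ("s".toList, 1, [])]

-- first-match traversal of the rule table (the for/break loop of Source B)
def pvApplyRules (rules : List (List Char × Int × List Char)) (base : List Char) : List Char :=
  match rules with
  | [] => base
  | (suf, strip, app) :: rs =>
    if PySem.Chars.endswith base suf then PySem.List.slice base none (some (-strip)) ++ app
    else pvApplyRules rs base

-- the character scan of Source B: a separator char arms the flag, an armed char is uppercased, the rest lowercased
def pvCamel (s : List Char) (cap : Bool) : List Char :=
  match s with
  | [] => []
  | c :: t =>
    if c = '_' then pvCamel t true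
    else if cap then PySem.Chars.upperChar c :: pvCamel t false
    else PySem.Chars.lowerChar c :: pvCamel t false

def table_to_model_alt (table : String) : String :=
  if table.toList = [] then "" else
  let base := PySem.Chars.lower (PySem.List.pyGetD (PySem.Chars.splitOn table.toList ['.']) (-1) [])
  String.mk (pvCamel (pvApplyRules pvRules base) true)

-- ===== PRECONDITION & SPEC =====
def Spec_table_to_model (table : String) (out : String) : Prop := out = table_to_model_alt table
instance (table : String) (out : String) : Decidable (Spec_table_to_model table out) := by unfold Spec_table_to_model; infer_instance

-- ===== CLAIM (what is proved, stated in full; the proofs are below) =====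
def Claim_equal_table_to_model : Prop := ∀ (table : String), Dom_table_to_model table → Spec_table_to_model table (table_to_model table)

-- ===== LEMMAS AND PROOFS =====

-- structural form of split on a single separator char
def pySplitU (s : List Char) : List (List Char) :=
  match s with
  | [] => [[]]
  | c :: t => if c = '_' then [] :: pySplitU t
              else (c :: (pySplitU t).headI) :: (pySplitU t).tail

theorem pySplitU_ne_nil (s : List Char) : pySplitU s ≠ [] := by
  cases s with
  | nil => simp [pySplitU]
  | cons c t => simp [pySplitU]; split_ifs <;> simp

theorem go_underscore (fuel : Nat) :
    ∀ (l cur : List Char) (acc : List (List Char)), l.length < fuel →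
      PySem.Chars.splitOn.go ['_'] fuel l cur acc
        = acc.reverse ++ (cur.reverse ++ (pySplitU l).headI) :: (pySplitU l).tail := by
  induction fuel with
  | zero => intro l cur acc h; omega
  | succ f ih =>
    intro l cur acc h
    cases l with
    | nil => simp [PySem.Chars.splitOn.go, pySplitU]
    | cons c rest =>
      by_cases hc : c = '_'
      · subst hc
        rw [show PySem.Chars.splitOn.go ['_'] (f+1) ('_' :: rest) cur acc
              = PySem.Chars.splitOn.go ['_'] f rest [] (cur.reverse :: acc) by
            simp [PySem.Chars.splitOn.go, List.isPrefixOf]]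
        rw [ih rest [] (cur.reverse :: acc) (by simpa using Nat.lt_of_succ_lt_succ h)]
        simp [pySplitU]
        cases hp : pySplitU rest with
        | nil => exact absurd hp (pySplitU_ne_nil rest)
        | cons p ps => simp
      · rw [show PySem.Chars.splitOn.go ['_'] (f+1) (c :: rest) cur acc
              = PySem.Chars.splitOn.go ['_'] f rest (c :: cur) acc by
            simp [PySem.Chars.splitOn.go, List.isPrefixOf, Ne.symm hc]]
        rw [ih rest (c :: cur) acc (by simpa using Nat.lt_of_succ_lt_succ h)]
        simp [pySplitU, hc]

theorem splitOn_underscore (s : List Char) :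
    PySem.Chars.splitOn s ['_'] = pySplitU s := by
  unfold PySem.Chars.splitOn
  rw [go_underscore (s.length + 1) s [] [] (by omega)]
  cases hp : pySplitU s with
  | nil => exact absurd hp (pySplitU_ne_nil s)
  | cons p ps => simp

theorem intercalate_nil (parts : List (List Char)) :
    ([] : List Char).intercalate parts = parts.flatten := by
  induction parts with
  | nil => simp [List.intercalate]
  | cons p ps ih =>
    cases ps with
    | nil => simp [List.intercalate]
    | cons q qs =>
      simp only [List.intercalate, List.intersperse] at *
      simp_all

theorem pvCamel_eq (s : List Char) :
    pvCamel s true = ((pySplitU s).map pyCapitalize).flatten ∧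
    pvCamel s false
      = PySem.Chars.lower (pySplitU s).headI
        ++ (((pySplitU s).tail).map pyCapitalize).flatten := by
  induction s with
  | nil => simp [pvCamel, pySplitU, pyCapitalize, PySem.Chars.lower]
  | cons c t ih =>
    by_cases hc : c = '_'
    · subst hc
      constructor
      · simpa [pvCamel, pySplitU, pyCapitalize] using ih.1
      · simpa [pvCamel, pySplitU, PySem.Chars.lower] using ih.1
    · cases hp : pySplitU t with
      | nil => exact absurd hp (pySplitU_ne_nil t)
      | cons p ps =>
        constructor
        · simp [pvCamel, pySplitU, hc, hp, pyCapitalize]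
          simpa [hp] using ih.2
        · simp [pvCamel, pySplitU, hc, hp, PySem.Chars.lower]
          simpa [hp, PySem.Chars.lower] using ih.2

theorem camel_join (s : List Char) :
    PySem.Chars.join [] ((PySem.Chars.splitOn s ['_']).map pyCapitalize) = pvCamel s true := by
  rw [splitOn_underscore, PySem.Chars.join, intercalate_nil, (pvCamel_eq s).1]

theorem singular_eq (base : List Char) :
    (if PySem.Chars.endswith base "ies".toList then
      PySem.List.slice base none (some (-3)) ++ "y".toList
    else if PySem.Chars.endswith base "sses".toList || PySem.Chars.endswith base "xes".toList
        || PySem.Chars.endswith base "zes".toList || PySem.Chars.endswith base "ches".toList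
        || PySem.Chars.endswith base "shes".toList then
      PySem.List.slice base none (some (-2))
    else if PySem.Chars.endswith base "s".toList then
      PySem.List.slice base none (some (-1))
    else base) = pvApplyRules pvRules base := by
  simp only [pvApplyRules, pvRules]
  norm_num
  split_ifs <;> simp_all

-- ===== VERDICT (by name: the statement is the Claim_ definition above) =====
theorem table_to_model_spec : Claim_equal_table_to_model := by
  intro table _
  unfold Spec_table_to_model table_to_model table_to_model_alt
  by_cases h : table.toList = []
  · simp [h]
  · simp only [h, if_false]
    rw [singular_eq, camel_join]
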